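-- pv_equiv track=rewrite | github.com/moca-owner-dev/RoyalEnfieldObd | debug/elm327_pids.py | decode_supported_pids
-- ===== SOURCE A (Python) =====
-- def decode_supported_pids(bitmap, base):
--     """Devuelve lista de PIDs soportados según el bitmap (4 bytes = 32 bits).
--
--     Bit MSB del primer byte = PID base+1, bit LSB del último byte = PID base+32.
--     """
--     supported = []
--     for byte_idx in range(4):
--         byte = bitmap[byte_idx]
--         for bit in range(8):
--             # MSB del byte = primer PID del grupo de 8
--             pid_offset = byte_idx * 8 + (7 - bit) + 1
--             if byte & (1 << bit):
--                 supported.append(base + pid_offset)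
--     return supported
-- ===== SOURCE B (Python) =====
-- def decode_supported_pids(bitmap, base):
--     """Devuelve lista de PIDs soportados segun el bitmap (4 bytes = 32 bits)."""
--     supported = []
--     for byte_idx in range(4):
--         b = bitmap[byte_idx] & 0xFF
--         while b:
--             bit = (b & -b).bit_length() - 1
--             supported.append(base + byte_idx * 8 + (7 - bit) + 1)
--             b &= b - 1
--     return supported
-- ===== Notes on version B (the rewrite author's own statement) =====
-- stated objective: alternative
-- what changed: B masks each byte to 0..255 and walks only its set bits with the lowest-set-bit trick (b & -b to find the bit, b &= b-1 to clear it) instead of testing all 8 bit positions per byte.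
import Mathlib
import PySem

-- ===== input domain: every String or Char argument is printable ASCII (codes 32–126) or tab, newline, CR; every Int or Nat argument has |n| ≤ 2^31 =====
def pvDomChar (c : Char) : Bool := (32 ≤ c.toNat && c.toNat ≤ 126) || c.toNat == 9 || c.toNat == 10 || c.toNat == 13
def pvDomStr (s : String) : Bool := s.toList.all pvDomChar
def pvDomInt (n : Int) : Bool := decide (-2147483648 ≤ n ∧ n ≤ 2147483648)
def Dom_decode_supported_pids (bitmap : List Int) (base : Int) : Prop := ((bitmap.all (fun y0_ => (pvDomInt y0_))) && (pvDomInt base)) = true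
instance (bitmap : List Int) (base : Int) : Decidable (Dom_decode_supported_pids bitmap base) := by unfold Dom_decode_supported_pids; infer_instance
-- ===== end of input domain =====

-- B walks only the set bits of each byte (masked to 0..255) with the lowest-set-bit
-- trick instead of testing all 8 bit positions; equivalence of return values is proved.

-- ===== PORT A =====
-- literal transliteration of A: for byte_idx in range(4): for bit in range(8): test byte & (1 << bit).
-- `1 << bit` is ported as `(1 : Int) <<< bit.toNat`; bit ranges over 0..7 so `.toNat` is exact.
def decode_supported_pids (bitmap : List Int) (base : Int) : List Int :=
  (PySem.List.pyRange 0 4 1).foldl (fun supported byte_idx =>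
    let byte := PySem.List.pyGetD bitmap byte_idx 0
    (PySem.List.pyRange 0 8 1).foldl (fun supported bit =>
      let pid_offset := byte_idx * 8 + (7 - bit) + 1
      if PySem.Int.band byte ((1 : Int) <<< bit.toNat) ≠ 0 then supported ++ [base + pid_offset]
      else supported) supported) []

-- ===== PORT B =====
-- the Python `while b:` loop; b = bitmap[i] & 0xFF is nonnegative, so it is carried as a Nat
-- (Nat's &&& agrees with Python's & on nonnegative values); `(b & -b).bit_length() - 1` is
-- ported literally via PySem.Int.band / PySem.Int.bitLength.
def pidBitsLoop (base byte_idx : Int) (b : Nat) (supported : List Int) : List Int :=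
  if hb : b = 0 then supported
  else
    let bit : Nat := PySem.Int.bitLength (PySem.Int.band (b : Int) (-(b : Int))) - 1
    pidBitsLoop base byte_idx (b &&& (b - 1)) (supported ++ [base + byte_idx * 8 + (7 - (bit : Int)) + 1])
  termination_by b
  decreasing_by exact lt_of_le_of_lt Nat.and_le_right (Nat.sub_lt (Nat.pos_of_ne_zero hb) one_pos)

def decode_supported_pids_alt (bitmap : List Int) (base : Int) : List Int :=
  (PySem.List.pyRange 0 4 1).foldl (fun supported byte_idx =>
    pidBitsLoop base byte_idx (PySem.Int.band (PySem.List.pyGetD bitmap byte_idx 0) 255).toNat supported) []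

-- ===== PRECONDITION & SPEC =====
-- A indexes bitmap[0..3]; on a list of fewer than 4 elements Python raises IndexError.
def Pre_decode_supported_pids (bitmap : List Int) (base : Int) : Prop := 4 ≤ bitmap.length
instance (bitmap : List Int) (base : Int) : Decidable (Pre_decode_supported_pids bitmap base) := by unfold Pre_decode_supported_pids; infer_instance
def pvWitness_decode_supported_pids : List Int × Int := ([190, 63, 168, 19], 0)

def Spec_decode_supported_pids (bitmap : List Int) (base : Int) (out : List Int) : Prop := out = decode_supported_pids_alt bitmap base
instance (bitmap : List Int) (base : Int) (out : List Int) : Decidable (Spec_decode_supported_pids bitmap base out) := by unfold Spec_decode_supported_pids; infer_instance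

-- ===== CLAIM (what is proved, stated in full; the proofs are below) =====
def Claim_equal_decode_supported_pids : Prop := ∀ (bitmap : List Int) (base : Int), Dom_decode_supported_pids bitmap base → Pre_decode_supported_pids bitmap base → Spec_decode_supported_pids bitmap base (decode_supported_pids bitmap base)

-- ===== LEMMAS AND PROOFS =====

-- the set bits of a byte value, in increasing position order
def pvBits (m : Nat) : List Nat := (List.range 8).filter (fun bit => m.testBit bit)

-- the PID contributed by bit position `bit` of byte `idx`
def pvPid (base idx : Int) (bit : Nat) : Int := base + idx * 8 + (7 - (bit : Int)) + 1

set_option maxRecDepth 20000 in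
lemma pvLowStep256 : ∀ m : Fin 256, m.val ≠ 0 →
    pvBits m.val = (PySem.Int.bitLength (PySem.Int.band (m.val : Int) (-(m.val : Int))) - 1)
      :: pvBits (m.val &&& (m.val - 1)) := by decide

lemma pvLowStep (m : Nat) (hm : m < 256) (h0 : m ≠ 0) :
    pvBits m = (PySem.Int.bitLength (PySem.Int.band (m : Int) (-(m : Int))) - 1)
      :: pvBits (m &&& (m - 1)) := pvLowStep256 ⟨m, hm⟩ h0

set_option maxRecDepth 20000 in
lemma pvSubXor : ∀ k : Fin 256, 255 - k.val = 255 ^^^ k.val := by decide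

lemma pvBandBit (x : Int) (b : Nat) (hb : b < 8) :
    (PySem.Int.band x ((1 : Int) <<< b) ≠ 0) ↔ (PySem.Int.band x 255).toNat.testBit b := by
  have h1 : ((1 : Int) <<< b) = ((2 ^ b : Nat) : Int) := by simp [Int.shiftLeft_eq]
  have h255 : Nat.testBit 255 b = true := by interval_cases b <;> decide
  rw [h1]
  by_cases hx : 0 ≤ x
  · rw [PySem.Int.band_of_nonneg hx (by positivity), PySem.Int.band_of_nonneg hx (by norm_num)]
    simp only [Int.toNat_natCast, show Int.toNat 255 = 255 from rfl, ne_eq, Int.natCast_eq_zero]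
    rw [Nat.and_two_pow, Nat.testBit_and, h255]
    have hpos : 0 < 2 ^ b := Nat.pow_pos (show 0 < 2 by norm_num)
    cases h : x.toNat.testBit b <;> simp [h] <;> omega
  · simp only [PySem.Int.band, if_neg hx, if_pos (show (0:Int) ≤ ((2 ^ b : Nat) : Int) by positivity),
      if_pos (show (0:Int) ≤ 255 by norm_num)]
    set m := (-x - 1).toNat with hm
    simp only [Int.toNat_natCast, show Int.toNat 255 = 255 from rfl, ne_eq, Int.natCast_eq_zero]
    have hand : 2 ^ b &&& m = (m.testBit b).toNat * 2 ^ b := by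
      rw [Nat.and_comm, Nat.and_two_pow]
    have hk : 255 &&& m ≤ 255 := Nat.and_le_left
    have h2 : 255 - (255 &&& m) = 255 ^^^ (255 &&& m) := pvSubXor ⟨255 &&& m, by omega⟩
    rw [hand, h2, Nat.testBit_xor, h255, Nat.testBit_and, h255]
    have hpos : 0 < 2 ^ b := Nat.pow_pos (show 0 < 2 by norm_num)
    cases h : m.testBit b <;> simp [h] <;> omega

lemma pvBand255_lt (x : Int) : (PySem.Int.band x 255).toNat < 256 := by
  by_cases hx : 0 ≤ x
  · rw [PySem.Int.band_of_nonneg hx (by norm_num)]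
    simp only [Int.toNat_natCast, show Int.toNat 255 = 255 from rfl]
    exact lt_of_le_of_lt Nat.and_le_right (by norm_num)
  · simp only [PySem.Int.band, if_neg hx, if_pos (show (0:Int) ≤ 255 by norm_num),
      Int.toNat_natCast, show Int.toNat 255 = 255 from rfl]
    omega

lemma pvLoop_eq (base idx : Int) : ∀ (m : Nat), m < 256 → ∀ (acc : List Int),
    pidBitsLoop base idx m acc = acc ++ (pvBits m).map (pvPid base idx) := by
  intro m
  induction m using Nat.strong_induction_on with
  | _ m ih =>
    intro hm acc
    rw [pidBitsLoop]
    by_cases h0 : m = 0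
    · rw [dif_pos h0, h0]
      have hz : pvBits 0 = [] := by decide
      simp [hz]
    · rw [dif_neg h0]
      have hlt : m &&& (m - 1) < m :=
        lt_of_le_of_lt Nat.and_le_right (Nat.sub_lt (Nat.pos_of_ne_zero h0) one_pos)
      rw [ih _ hlt (lt_trans hlt hm) _]
      rw [pvLowStep m hm h0]
      simp [pvPid]

lemma pvLoop_eq' (base idx x : Int) (acc : List Int) :
    pidBitsLoop base idx (PySem.Int.band x 255).toNat acc
      = acc ++ (pvBits (PySem.Int.band x 255).toNat).map (pvPid base idx) :=
  pvLoop_eq base idx _ (pvBand255_lt x) acc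

lemma pvInnerA_eq (byte base idx : Int) (acc : List Int) :
    (PySem.List.pyRange 0 8 1).foldl (fun supported bit =>
      let pid_offset := idx * 8 + (7 - bit) + 1
      if PySem.Int.band byte ((1 : Int) <<< bit.toNat) ≠ 0 then supported ++ [base + pid_offset]
      else supported) acc
    = acc ++ (pvBits (PySem.Int.band byte 255).toNat).map (pvPid base idx) := by
  have h8 : PySem.List.pyRange 0 8 1 = List.map (fun (k : Nat) => (k : Int)) (List.range 8) := by decide
  rw [h8, List.foldl_map]
  refine Eq.trans (PySem.List.foldl_congr_mem (List.range 8) _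
      (fun supported k => if (PySem.Int.band byte 255).toNat.testBit k
        then supported ++ [pvPid base idx k] else supported) acc ?_)
    (PySem.List.foldl_append_if _ _ _ _)
  intro acc' k hk
  have hk8 : k < 8 := List.mem_range.mp hk
  simp only [Int.toNat_natCast]
  by_cases h : PySem.Int.band byte ((1 : Int) <<< k) ≠ 0
  · rw [if_pos h, if_pos ((pvBandBit byte k hk8).mp h)]
    have : base + (idx * 8 + (7 - (k : Int)) + 1) = pvPid base idx k := by
      simp [pvPid]; ring
    simp [this]
  · rw [if_neg h, if_neg (by simpa using (pvBandBit byte k hk8).not.mp h)]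

-- ===== VERDICT (by name: the statement is the Claim_ definition above) =====
theorem decode_supported_pids_spec : Claim_equal_decode_supported_pids := by
  intro bitmap base _ _
  unfold Spec_decode_supported_pids decode_supported_pids decode_supported_pids_alt
  have h4 : PySem.List.pyRange 0 4 1 = [0, 1, 2, 3] := by decide
  rw [h4]
  simp only [List.foldl]
  rw [pvInnerA_eq, pvInnerA_eq, pvInnerA_eq, pvInnerA_eq,
    pvLoop_eq', pvLoop_eq', pvLoop_eq', pvLoop_eq']
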